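-- pv_equiv track=rewrite | github.com/Mis1Kid/MineCars | tools/utils.py | calFinalSize
-- ===== SOURCE A (Python) =====
-- import math
--
-- def calFinalSize(imgSize, timesceil, timesfloor):
--     imgsize = list(imgSize)
--     for i in range(timesceil):
--         imgsize[0] = math.ceil(imgsize[0] / 2)
--         imgsize[1] = math.ceil(imgsize[1] / 2)
--     for i in range(timesfloor):
--         imgsize[0] = math.floor(imgsize[0] / 2)
--         imgsize[1] = math.floor(imgsize[1] / 2)
--     return imgsize[0] * imgsize[1]
-- ===== SOURCE B (Python) =====
-- def calFinalSize(imgSize, timesceil, timesfloor):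
--     w, h = imgSize[0], imgSize[1]
--     kc = timesceil if timesceil > 0 else 0
--     kf = timesfloor if timesfloor > 0 else 0
--     # ceil(x / 2**kc) == -((-x) >> kc); then floor-halve kf times == >> kf
--     w = (-((-w) >> kc)) >> kf
--     h = (-((-h) >> kc)) >> kf
--     return w * h
-- ===== Notes on version B (the rewrite author's own statement) =====
-- stated objective: faster
-- what changed: Replaces the two halving loops with closed-form bit shifts (ceil(x/2^kc) = -((-x) >> kc), then >> kf for the floor rounds) on the two dimensions, so the answer is computed in O(1) arithmetic instead of iterating timesceil+timesfloor times; Pre_ excludes lists of fewer than 2 elements, on which both A and B raise IndexError.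
import Mathlib
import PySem

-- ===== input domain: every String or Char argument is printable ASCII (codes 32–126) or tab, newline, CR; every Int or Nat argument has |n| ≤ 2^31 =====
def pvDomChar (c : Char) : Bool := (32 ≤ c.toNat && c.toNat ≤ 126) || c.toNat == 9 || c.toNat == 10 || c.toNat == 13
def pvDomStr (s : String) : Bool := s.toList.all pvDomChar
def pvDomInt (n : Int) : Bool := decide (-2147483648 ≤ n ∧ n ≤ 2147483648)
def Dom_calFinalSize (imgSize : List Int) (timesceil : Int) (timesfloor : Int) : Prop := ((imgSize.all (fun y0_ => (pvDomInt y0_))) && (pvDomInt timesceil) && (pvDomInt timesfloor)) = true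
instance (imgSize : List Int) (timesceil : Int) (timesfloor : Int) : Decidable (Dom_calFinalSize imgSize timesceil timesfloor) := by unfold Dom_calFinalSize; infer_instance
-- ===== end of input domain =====

-- B replaces the two halving loops by closed-form shifts (ceil(x/2^k) = -((-x) >> k), then >> for the
-- floor rounds), turning O(timesceil+timesfloor) loop iterations into O(1) arithmetic.
-- Pre_ excludes lists of fewer than 2 elements, on which the Python A raises IndexError.

-- ===== PORT A =====
-- math.ceil(x / 2): exact for ints within the |n| ≤ 2^31 domain (the float quotient is exact there)
def pvCeilHalf (x : Int) : Int := -(PySem.Int.floordiv (-x) 2)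
-- math.floor(x / 2): likewise exact on the domain
def pvFloorHalf (x : Int) : Int := PySem.Int.floordiv x 2
-- one body of 'for i in range(timesceil)': read/write indices 0 and 1 sequentially
-- (getD 0 stands for Python indexing; Pre_ rules out the short lists where Python raises IndexError)
def pvStepCeil (l : List Int) : List Int :=
  let l1 := l.set 0 (pvCeilHalf (l.getD 0 0))
  l1.set 1 (pvCeilHalf (l1.getD 1 0))
def pvStepFloor (l : List Int) : List Int :=
  let l1 := l.set 0 (pvFloorHalf (l.getD 0 0))
  l1.set 1 (pvFloorHalf (l1.getD 1 0))

def calFinalSize (imgSize : List Int) (timesceil : Int) (timesfloor : Int) : Int :=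
  let s1 := (PySem.List.pyRange 0 timesceil).foldl (fun l _ => pvStepCeil l) imgSize
  let s2 := (PySem.List.pyRange 0 timesfloor).foldl (fun l _ => pvStepFloor l) s1
  s2.getD 0 0 * s2.getD 1 0

-- ===== PORT B =====
def calFinalSize_alt (imgSize : List Int) (timesceil : Int) (timesfloor : Int) : Int :=
  let w := imgSize.getD 0 0
  let h := imgSize.getD 1 0
  let kc : Nat := (if timesceil > 0 then timesceil else 0).toNat
  let kf : Nat := (if timesfloor > 0 then timesfloor else 0).toNat
  let w' := (-((-w) >>> kc)) >>> kf
  let h' := (-((-h) >>> kc)) >>> kf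
  w' * h'

-- ===== PRECONDITION & SPEC =====
-- Python A (and B) raise IndexError when imgSize has fewer than two elements
def Pre_calFinalSize (imgSize : List Int) (timesceil : Int) (timesfloor : Int) : Prop :=
  2 ≤ imgSize.length
instance (imgSize : List Int) (timesceil : Int) (timesfloor : Int) : Decidable (Pre_calFinalSize imgSize timesceil timesfloor) := by unfold Pre_calFinalSize; infer_instance
def pvWitness_calFinalSize : List Int × Int × Int := ([10, 7], 2, 1)

def Spec_calFinalSize (imgSize : List Int) (timesceil : Int) (timesfloor : Int) (out : Int) : Prop := out = calFinalSize_alt imgSize timesceil timesfloor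
instance (imgSize : List Int) (timesceil : Int) (timesfloor : Int) (out : Int) : Decidable (Spec_calFinalSize imgSize timesceil timesfloor out) := by unfold Spec_calFinalSize; infer_instance

-- ===== CLAIM (what is proved, stated in full; the proofs are below) =====
def Claim_equal_calFinalSize : Prop := ∀ (imgSize : List Int) (timesceil : Int) (timesfloor : Int), Dom_calFinalSize imgSize timesceil timesfloor → Pre_calFinalSize imgSize timesceil timesfloor → Spec_calFinalSize imgSize timesceil timesfloor (calFinalSize imgSize timesceil timesfloor)

-- ===== LEMMAS AND PROOFS =====

-- a fold over range(n) that ignores the loop variable is an n-fold iteration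
theorem foldl_const_eq_iterate {α : Type} (f : α → α) :
    ∀ (l : List Int) (init : α), l.foldl (fun s _ => f s) init = f^[l.length] init := by
  intro l
  induction l with
  | nil => intro init; rfl
  | cons a t ih =>
      intro init
      simp [List.foldl_cons, ih, Function.iterate_succ_apply]

theorem length_pyRange_zero (n : Int) : (PySem.List.pyRange 0 n).length = n.toNat := by
  by_cases h : n ≤ 0
  · have : PySem.List.pyRange 0 n = [] := by simp [PySem.List.pyRange]; omega
    simp [this]; omega
  · have hn : n = ((n.toNat : Nat) : Int) := by omega
    rw [hn, PySem.List.pyRange_zero_natCast]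
    simp
    omega

theorem stepCeil_cons (x y : Int) (r : List Int) :
    pvStepCeil (x :: y :: r) = pvCeilHalf x :: pvCeilHalf y :: r := by
  simp [pvStepCeil]

theorem stepFloor_cons (x y : Int) (r : List Int) :
    pvStepFloor (x :: y :: r) = pvFloorHalf x :: pvFloorHalf y :: r := by
  simp [pvStepFloor]

theorem iterate_stepCeil (n : Nat) (x y : Int) (r : List Int) :
    pvStepCeil^[n] (x :: y :: r) = pvCeilHalf^[n] x :: pvCeilHalf^[n] y :: r := by
  induction n generalizing x y with
  | zero => rfl
  | succ m ih =>
      rw [Function.iterate_succ_apply, stepCeil_cons, ih,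
        Function.iterate_succ_apply, Function.iterate_succ_apply]

theorem iterate_stepFloor (n : Nat) (x y : Int) (r : List Int) :
    pvStepFloor^[n] (x :: y :: r) = pvFloorHalf^[n] x :: pvFloorHalf^[n] y :: r := by
  induction n generalizing x y with
  | zero => rfl
  | succ m ih =>
      rw [Function.iterate_succ_apply, stepFloor_cons, ih,
        Function.iterate_succ_apply, Function.iterate_succ_apply]

theorem iterate_floorHalf (n : Nat) (x : Int) : pvFloorHalf^[n] x = x >>> n := by
  induction n generalizing x with
  | zero => simp [Int.shiftRight_eq_div_pow]
  | succ m ih =>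
      rw [Function.iterate_succ_apply', ih, pvFloorHalf,
        PySem.Int.floordiv_eq_ediv_of_pos (by omega),
        Int.shiftRight_eq_div_pow, Int.shiftRight_eq_div_pow,
        Int.ediv_ediv_of_nonneg (by positivity), pow_succ]
      push_cast
      ring_nf

theorem iterate_ceilHalf (n : Nat) (x : Int) : pvCeilHalf^[n] x = -((-x) >>> n) := by
  induction n generalizing x with
  | zero => simp [Int.shiftRight_eq_div_pow]
  | succ m ih =>
      rw [Function.iterate_succ_apply', ih, pvCeilHalf,
        PySem.Int.floordiv_eq_ediv_of_pos (by omega), neg_neg,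
        Int.shiftRight_eq_div_pow, Int.shiftRight_eq_div_pow,
        Int.ediv_ediv_of_nonneg (by positivity), pow_succ]
      push_cast
      ring_nf

-- ===== VERDICT (by name: the statement is the Claim_ definition above) =====
theorem calFinalSize_spec : Claim_equal_calFinalSize := by
  intro imgSize timesceil timesfloor _ hpre
  unfold Spec_calFinalSize
  match imgSize, hpre with
  | x :: y :: r, _ =>
    simp only [calFinalSize, calFinalSize_alt]
    rw [foldl_const_eq_iterate pvStepCeil, length_pyRange_zero, iterate_stepCeil,
      foldl_const_eq_iterate pvStepFloor, length_pyRange_zero, iterate_stepFloor]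
    have hc : (if timesceil > 0 then timesceil else 0).toNat = timesceil.toNat := by
      split <;> omega
    have hf : (if timesfloor > 0 then timesfloor else 0).toNat = timesfloor.toNat := by
      split <;> omega
    simp only [List.getD_cons_zero, List.getD_cons_succ, hc, hf,
      iterate_floorHalf, iterate_ceilHalf]
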